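-- pv_equiv track=rewrite | github.com/melegithubyit/competitive-programming | solutions2/leetcode/max-increase-to-keep-city-skyline.py | maxIncreaseKeepingSkyline
-- ===== SOURCE A (Python) =====
-- from typing import List
--
-- def maxIncreaseKeepingSkyline(grid: List[List[int]]) -> int:
--     transposed = list(map(list, zip(*grid)))
--     count = 0
--
--     for row in range(len(grid)):
--         for col in range(len(grid[0])):
--             stored_val = min(max(grid[row]), max(transposed[col]))
--             count += abs(stored_val - grid[row][col])
--
--     return count
-- ===== SOURCE B (Python) =====
-- def maxIncreaseKeepingSkyline(grid):
--     if not grid or not grid[0]: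
--         return 0
--     row_max = [max(r) for r in grid]
--     col_max = [max(c) for c in zip(*grid)]
--     return sum(min(row_max[i], col_max[j]) - grid[i][j]
--                for i in range(len(grid)) for j in range(len(grid[0])))
-- ===== Notes on version B (the rewrite author's own statement) =====
-- stated objective: faster
-- what changed: B precomputes the list of row maxima and column maxima once and then does a single O(1) computation per cell, instead of A's rescanning the whole row and whole column (max(grid[row]), max(transposed[col])) for every cell; the abs() disappears because the skyline minimum never lies below the cell.
import Mathlib
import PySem

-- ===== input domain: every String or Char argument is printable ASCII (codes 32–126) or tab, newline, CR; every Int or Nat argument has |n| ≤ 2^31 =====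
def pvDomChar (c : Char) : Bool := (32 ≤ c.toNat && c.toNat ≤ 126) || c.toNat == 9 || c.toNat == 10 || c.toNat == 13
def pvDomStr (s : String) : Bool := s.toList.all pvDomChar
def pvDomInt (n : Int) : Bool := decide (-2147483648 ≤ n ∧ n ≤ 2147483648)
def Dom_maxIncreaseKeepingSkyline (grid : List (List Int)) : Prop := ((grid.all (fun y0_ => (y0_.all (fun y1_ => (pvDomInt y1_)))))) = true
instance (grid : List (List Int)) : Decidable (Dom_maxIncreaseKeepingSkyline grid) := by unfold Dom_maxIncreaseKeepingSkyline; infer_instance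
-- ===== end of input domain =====

-- B precomputes the row maxima and column maxima once and does one O(1) computation per
-- cell (O(n*m)) instead of A's per-cell row/column max scans (O(n*m*(n+m))).

-- ===== PORT A =====
-- zip(*rows): Python's zip truncates at the shortest row; exact transliteration of that
-- behaviour (fuel = length of the first row, which always bounds the number of emitted columns).
def zipTAux : Nat → List (List Int) → List (List Int)
  | 0, _ => []
  | fuel + 1, rows =>
    if rows.isEmpty = true ∨ rows.any (fun r => r.isEmpty) = true then []
    else (rows.map fun r => r.headD 0) :: zipTAux fuel (rows.map fun r => r.tail)

def zipT (rows : List (List Int)) : List (List Int) :=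
  zipTAux (rows.headD []).length rows

def maxIncreaseKeepingSkyline (grid : List (List Int)) : Int :=
  let transposed := zipT grid
  let count : Int := 0
  (PySem.List.pyRange 0 grid.length 1).foldl (fun count row =>
    (PySem.List.pyRange 0 (PySem.List.pyGetD grid 0 []).length 1).foldl (fun count col =>
      let storedVal :=
        min ((PySem.List.max? (PySem.List.pyGetD grid row []) (fun y => y)).getD 0)
            ((PySem.List.max? (PySem.List.pyGetD transposed col []) (fun y => y)).getD 0)
      count + |storedVal - PySem.List.pyGetD (PySem.List.pyGetD grid row []) col 0|) count) count

-- ===== PORT B =====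
def maxIncreaseKeepingSkyline_alt (grid : List (List Int)) : Int :=
  if grid.isEmpty = true ∨ (PySem.List.pyGetD grid 0 []).isEmpty = true then 0
  else
    let rowMax := grid.map fun r => (PySem.List.max? r (fun y => y)).getD 0
    let colMax := (zipT grid).map fun c => (PySem.List.max? c (fun y => y)).getD 0
    ((List.range grid.length).map fun i =>
      ((List.range (PySem.List.pyGetD grid 0 []).length).map fun j =>
        min (rowMax.getD i 0) (colMax.getD j 0)
          - PySem.List.pyGetD (PySem.List.pyGetD grid (i : Int) []) (j : Int) 0).sum).sum

-- ===== PRECONDITION & SPEC =====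
-- Pre_ excludes exactly the inputs on which A raises: ragged grids whose first row is
-- strictly longer than some other row (A's transposed[col] / IndexError; B raises there too).
def Pre_maxIncreaseKeepingSkyline (grid : List (List Int)) : Prop :=
  ∀ r ∈ grid, (grid.headD []).length ≤ r.length
instance (grid : List (List Int)) : Decidable (Pre_maxIncreaseKeepingSkyline grid) := by
  unfold Pre_maxIncreaseKeepingSkyline; infer_instance

def pvWitness_maxIncreaseKeepingSkyline : List (List Int) := [[3, 0], [2, 4]]

def Spec_maxIncreaseKeepingSkyline (grid : List (List Int)) (out : Int) : Prop := out = maxIncreaseKeepingSkyline_alt grid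
instance (grid : List (List Int)) (out : Int) : Decidable (Spec_maxIncreaseKeepingSkyline grid out) := by unfold Spec_maxIncreaseKeepingSkyline; infer_instance

-- ===== CLAIM =====
def Claim_equal_maxIncreaseKeepingSkyline : Prop := ∀ (grid : List (List Int)), Dom_maxIncreaseKeepingSkyline grid → Pre_maxIncreaseKeepingSkyline grid → Spec_maxIncreaseKeepingSkyline grid (maxIncreaseKeepingSkyline grid)

-- ===== LEMMAS AND PROOFS =====

theorem getD_tail_int (r : List Int) (j : Nat) : r.tail.getD j 0 = r.getD (j+1) 0 := by
  cases r <;> simp [List.getD]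

theorem headD_eq_getD_int (r : List Int) : r.headD 0 = r.getD 0 0 := by
  cases r <;> rfl

theorem zipTAux_eq (w : Nat) : ∀ (fuel : Nat) (rows : List (List Int)),
    w ≤ fuel → (∀ r ∈ rows, w ≤ r.length) → (∃ r ∈ rows, r.length = w) →
    zipTAux fuel rows = (List.range w).map (fun j => rows.map (fun r => r.getD j 0)) := by
  induction w with
  | zero =>
    intro fuel rows _ _ hex
    obtain ⟨r, hr, hlen⟩ := hex
    have hr0 : r = [] := List.eq_nil_of_length_eq_zero hlen
    cases fuel with
    | zero => rfl
    | succ f =>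
      simp only [zipTAux, List.range_zero, List.map_nil]
      rw [if_pos]
      right
      exact List.any_eq_true.mpr ⟨r, hr, by simp [hr0]⟩
  | succ w ih =>
    intro fuel rows hfuel hall hex
    obtain ⟨f, rfl⟩ : ∃ f, fuel = f + 1 := ⟨fuel - 1, by omega⟩
    obtain ⟨r0, hr0, hlen0⟩ := hex
    have hne : rows ≠ [] := by intro h; subst h; exact absurd hr0 (by simp)
    have hcond : ¬(rows.isEmpty = true ∨ rows.any (fun r => r.isEmpty) = true) := by
      rw [not_or]
      refine ⟨by simpa using hne, ?_⟩
      simp only [List.any_eq_true, not_exists, not_and]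
      intro r hr
      have := hall r hr
      cases r with
      | nil => simp at this
      | cons a t => simp
    simp only [zipTAux, if_neg hcond]
    rw [ih f (rows.map fun r => r.tail) (by omega)
      (by intro t ht; obtain ⟨r, hr, rfl⟩ := List.mem_map.mp ht
          have := hall r hr; simp [List.length_tail]; omega)
      ⟨r0.tail, List.mem_map.mpr ⟨r0, hr0, rfl⟩, by simp [List.length_tail, hlen0]⟩]
    rw [List.range_succ_eq_map]
    simp only [List.map_cons, List.map_map]
    congr 1
    · exact List.map_congr_left (fun r _ => headD_eq_getD_int r)
    · apply List.map_congr_left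
      intro j _
      simp only [Function.comp_def]
      exact List.map_congr_left (fun r _ => getD_tail_int r j)

theorem getD_map_lt {α β : Type} (l : List α) (f : α → β) (i : Nat) (d : α) (db : β)
    (h : i < l.length) : (l.map f).getD i db = f (l.getD i d) := by
  rw [List.getD_eq_getElem _ _ (by simpa using h), List.getD_eq_getElem _ _ h,
    List.getElem_map]

theorem main_eq (grid : List (List Int))
    (hpre : ∀ r ∈ grid, (grid.headD []).length ≤ r.length) :
    maxIncreaseKeepingSkyline grid = maxIncreaseKeepingSkyline_alt grid := by
  cases grid with
  | nil => decide
  | cons g0 gs =>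
    rcases Nat.eq_zero_or_pos g0.length with hw | hw
    · have hg0 : g0 = [] := List.eq_nil_of_length_eq_zero hw
      subst hg0
      simp [maxIncreaseKeepingSkyline, maxIncreaseKeepingSkyline_alt,
        PySem.List.pyGetD_zero_cons]
    · have hcol : zipT (g0 :: gs) = (List.range g0.length).map
          (fun j => (g0 :: gs).map (fun r => r.getD j 0)) := by
        apply zipTAux_eq
        · simp
        · simpa using hpre
        · exact ⟨g0, by simp⟩
      have hg0ne : g0.isEmpty = false := by cases g0 <;> simp_all
      simp only [maxIncreaseKeepingSkyline, maxIncreaseKeepingSkyline_alt, hcol,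
        PySem.List.pyGetD_zero_cons, PySem.List.foldl_add,
        PySem.List.pyRange_zero_nat, List.map_map, List.isEmpty_cons, hg0ne,
        Bool.false_eq_true, or_self, if_false, zero_add]
      simp only [Function.comp_def, PySem.List.pyGetD_natCast]
      refine congrArg List.sum (List.map_congr_left ?_)
      intro i hi
      have hi' : i < (g0 :: gs).length := List.mem_range.mp hi
      refine congrArg List.sum (List.map_congr_left ?_)
      intro j hj
      have hj' : j < g0.length := List.mem_range.mp hj
      -- precomputed maxima coincide with A's per-cell scans
      rw [getD_map_lt (g0 :: gs) _ i [] 0 hi',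
        getD_map_lt (List.range g0.length) _ j 0 ([] : List Int) (by simpa using hj'),
        getD_map_lt (List.range g0.length) _ j 0 (0 : Int) (by simpa using hj'),
        List.getD_eq_getElem (List.range g0.length) 0 (by simpa using hj'),
        List.getElem_range]
      -- the abs elimination: the skyline minimum never lies below the cell
      set r : List Int := (g0 :: gs).getD i [] with hr_def
      have hr : r ∈ g0 :: gs := by
        rw [hr_def, List.getD_eq_getElem _ _ hi']
        exact List.getElem_mem hi'
      have hlen : g0.length ≤ r.length := by simpa using hpre r hr
      have hjr : j < r.length := lt_of_lt_of_le hj' hlen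
      have hv : r.getD j 0 ∈ r := by
        rw [List.getD_eq_getElem _ _ hjr]; exact List.getElem_mem hjr
      have hrne : r ≠ [] := List.ne_nil_of_length_pos (by omega)
      obtain ⟨m, hm⟩ : ∃ m, PySem.List.max? r (fun y => y) = some m := by
        cases h : PySem.List.max? r (fun y => y) with
        | none => exact absurd ((PySem.List.max?_eq_none_iff r _).mp h) hrne
        | some m => exact ⟨m, rfl⟩
      have hvm : r.getD j 0 ≤ m := PySem.List.max?_isMax hm _ hv
      have hvcol : r.getD j 0 ∈ (g0 :: gs).map (fun r => r.getD j 0) :=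
        List.mem_map.mpr ⟨r, hr, rfl⟩
      obtain ⟨m', hm'⟩ : ∃ m', PySem.List.max? ((g0 :: gs).map (fun r => r.getD j 0)) (fun y => y) = some m' := by
        cases h : PySem.List.max? ((g0 :: gs).map (fun r => r.getD j 0)) (fun y => y) with
        | none => exact absurd ((PySem.List.max?_eq_none_iff _ _).mp h) (by simp)
        | some m' => exact ⟨m', rfl⟩
      have hvm' : r.getD j 0 ≤ m' := PySem.List.max?_isMax hm' _ hvcol
      rw [hm, hm']
      simp only [Option.getD_some]
      rw [abs_of_nonneg (by rw [sub_nonneg]; exact le_min hvm hvm')]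

-- ===== VERDICT =====
theorem maxIncreaseKeepingSkyline_spec : Claim_equal_maxIncreaseKeepingSkyline := by
  intro grid _dom hpre
  unfold Spec_maxIncreaseKeepingSkyline
  exact main_eq grid hpre
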